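-- pv_equiv track=rewrite | github.com/mahmunakhan/AIRESUME | main1.py | format_html_output
-- ===== SOURCE A (Python) =====
-- def format_html_output(text):
--     """Format and sanitize HTML output from LLM"""
--     # First escape all HTML
--     text = text.replace('<', '&lt;').replace('>', '&gt;')
--
--     # Then selectively allow specific tags
--     allowed_tags = {
--         '&lt;strong&gt;': '<strong>',
--         '&lt;/strong&gt;': '</strong>',
--         '&lt;em&gt;': '<em>',
--         '&lt;/em&gt;': '</em>',
--         '&lt;span class="highlight"&gt;': '<span class="highlight">',
--         '&lt;span class="percentage"&gt;': '<span class="percentage">',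
--         '&lt;span class="keyword"&gt;': '<span class="keyword">',
--         '&lt;span class="recommendation"&gt;': '<span class="recommendation">',
--         '&lt;/span&gt;': '</span>',
--         '&lt;ul&gt;': '<ul>',
--         '&lt;/ul&gt;': '</ul>',
--         '&lt;li&gt;': '<li>',
--         '&lt;/li&gt;': '</li>',
--         '&lt;h2&gt;': '<h2>',
--         '&lt;/h2&gt;': '</h2>',
--         '&lt;h3&gt;': '<h3>',
--         '&lt;/h3&gt;': '</h3>',
--         '&lt;h4&gt;': '<h4>',
--         '&lt;/h4&gt;': '</h4>'
--     }
--
--     for escaped, tag in allowed_tags.items():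
--         text = text.replace(escaped, tag)
--
--     return text
-- ===== SOURCE B (Python) =====
-- _ALLOWED = [
--     ('&lt;strong&gt;', '<strong>'),
--     ('&lt;/strong&gt;', '</strong>'),
--     ('&lt;em&gt;', '<em>'),
--     ('&lt;/em&gt;', '</em>'),
--     ('&lt;span class="highlight"&gt;', '<span class="highlight">'),
--     ('&lt;span class="percentage"&gt;', '<span class="percentage">'),
--     ('&lt;span class="keyword"&gt;', '<span class="keyword">'),
--     ('&lt;span class="recommendation"&gt;', '<span class="recommendation">'),
--     ('&lt;/span&gt;', '</span>'),
--     ('&lt;ul&gt;', '<ul>'),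
--     ('&lt;/ul&gt;', '</ul>'),
--     ('&lt;li&gt;', '<li>'),
--     ('&lt;/li&gt;', '</li>'),
--     ('&lt;h2&gt;', '<h2>'),
--     ('&lt;/h2&gt;', '</h2>'),
--     ('&lt;h3&gt;', '<h3>'),
--     ('&lt;/h3&gt;', '</h3>'),
--     ('&lt;h4&gt;', '<h4>'),
--     ('&lt;/h4&gt;', '</h4>'),
-- ]
--
--
-- def format_html_output(text):
--     """Format and sanitize HTML output from LLM (single-scan re-implementation)."""
--     escaped = ''.join('&lt;' if c == '<' else '&gt;' if c == '>' else c for c in text)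
--     out = []
--     i = 0
--     n = len(escaped)
--     while i < n:
--         for key, tag in _ALLOWED:
--             if escaped.startswith(key, i):
--                 out.append(tag)
--                 i += len(key)
--                 break
--         else:
--             out.append(escaped[i])
--             i += 1
--     return ''.join(out)
-- ===== Notes on version B (the rewrite author's own statement) =====
-- stated objective: alternative
-- what changed: B escapes with one per-character pass and then un-escapes whitelisted tags in a single left-to-right first-match scan, instead of A's 2 + 19 separate full .replace passes over the text.
import Mathlib
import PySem

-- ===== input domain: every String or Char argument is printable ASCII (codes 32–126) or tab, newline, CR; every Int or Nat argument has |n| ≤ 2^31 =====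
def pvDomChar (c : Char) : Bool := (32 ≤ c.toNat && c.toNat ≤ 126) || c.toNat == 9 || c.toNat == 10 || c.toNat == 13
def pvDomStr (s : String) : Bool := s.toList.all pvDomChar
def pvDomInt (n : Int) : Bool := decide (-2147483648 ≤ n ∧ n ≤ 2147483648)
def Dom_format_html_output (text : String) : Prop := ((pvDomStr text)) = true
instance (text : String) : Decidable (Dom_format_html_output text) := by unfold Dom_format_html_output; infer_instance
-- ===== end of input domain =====

-- B (the _alt port) replaces A's 2 + 19 separate full-string .replace passes by one per-character
-- escape pass followed by a single left-to-right first-match scan; same return value, no side effects.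

-- ===== PORT A =====

-- the allowed_tags dict of A, as an association list in insertion order
def pvAllowed : List (String × String) :=
  [ ("&lt;strong&gt;", "<strong>"),
    ("&lt;/strong&gt;", "</strong>"),
    ("&lt;em&gt;", "<em>"),
    ("&lt;/em&gt;", "</em>"),
    ("&lt;span class=\"highlight\"&gt;", "<span class=\"highlight\">"),
    ("&lt;span class=\"percentage\"&gt;", "<span class=\"percentage\">"),
    ("&lt;span class=\"keyword\"&gt;", "<span class=\"keyword\">"),
    ("&lt;span class=\"recommendation\"&gt;", "<span class=\"recommendation\">"),
    ("&lt;/span&gt;", "</span>"),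
    ("&lt;ul&gt;", "<ul>"),
    ("&lt;/ul&gt;", "</ul>"),
    ("&lt;li&gt;", "<li>"),
    ("&lt;/li&gt;", "</li>"),
    ("&lt;h2&gt;", "<h2>"),
    ("&lt;/h2&gt;", "</h2>"),
    ("&lt;h3&gt;", "<h3>"),
    ("&lt;/h3&gt;", "</h3>"),
    ("&lt;h4&gt;", "<h4>"),
    ("&lt;/h4&gt;", "</h4>") ]

def format_html_output (text : String) : String :=
  -- text = text.replace('<', '&lt;').replace('>', '&gt;')
  let text := PySem.Str.replace (PySem.Str.replace text "<" "&lt;") ">" "&gt;"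
  -- for escaped, tag in allowed_tags.items(): text = text.replace(escaped, tag)
  pvAllowed.foldl (fun t kv => PySem.Str.replace t kv.1 kv.2) text

-- ===== PORT B =====

-- Source B's _ALLOWED table, at the character-list level
def pvKeysC : List (List Char × List Char) :=
  [ ("&lt;strong&gt;".toList, "<strong>".toList),
    ("&lt;/strong&gt;".toList, "</strong>".toList),
    ("&lt;em&gt;".toList, "<em>".toList),
    ("&lt;/em&gt;".toList, "</em>".toList),
    ("&lt;span class=\"highlight\"&gt;".toList, "<span class=\"highlight\">".toList),
    ("&lt;span class=\"percentage\"&gt;".toList, "<span class=\"percentage\">".toList),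
    ("&lt;span class=\"keyword\"&gt;".toList, "<span class=\"keyword\">".toList),
    ("&lt;span class=\"recommendation\"&gt;".toList, "<span class=\"recommendation\">".toList),
    ("&lt;/span&gt;".toList, "</span>".toList),
    ("&lt;ul&gt;".toList, "<ul>".toList),
    ("&lt;/ul&gt;".toList, "</ul>".toList),
    ("&lt;li&gt;".toList, "<li>".toList),
    ("&lt;/li&gt;".toList, "</li>".toList),
    ("&lt;h2&gt;".toList, "<h2>".toList),
    ("&lt;/h2&gt;".toList, "</h2>".toList),
    ("&lt;h3&gt;".toList, "<h3>".toList),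
    ("&lt;/h3&gt;".toList, "</h3>".toList),
    ("&lt;h4&gt;".toList, "<h4>".toList),
    ("&lt;/h4&gt;".toList, "</h4>".toList) ]

-- '&lt;' if c == '<' else '&gt;' if c == '>' else c
def pvEscapeC (c : Char) : List Char :=
  if c = '<' then "&lt;".toList else if c = '>' then "&gt;".toList else [c]

-- the inner 'for key, tag in _ALLOWED: if escaped.startswith(key, i)' loop: first matching entry
def pvFindKey (s : List Char) : Option (List Char × List Char) :=
  pvKeysC.find? (fun kv => kv.1.isPrefixOf s)

-- every key is nonempty (needed for termination of the scan)
theorem pvKeysC_fst_pos : ∀ kv ∈ pvKeysC, 0 < kv.1.length := by decide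

-- the 'while i < n' scan: emit the tag of the first matching key and jump, else copy one char
def pvScan (s : List Char) : List Char :=
  match s with
  | [] => []
  | c :: t =>
    match h : pvFindKey (c :: t) with
    | some kv => kv.2 ++ pvScan ((c :: t).drop kv.1.length)
    | none => c :: pvScan t
termination_by s.length
decreasing_by
  · have hmem := List.mem_of_find?_eq_some h
    have hpos := pvKeysC_fst_pos _ hmem
    simp only [List.length_drop, List.length_cons]
    omega
  · simp

def format_html_output_alt (text : String) : String :=
  String.ofList (pvScan (text.toList.flatMap pvEscapeC))

-- ===== PRECONDITION & SPEC =====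
def Spec_format_html_output (text : String) (out : String) : Prop := out = format_html_output_alt text
instance (text : String) (out : String) : Decidable (Spec_format_html_output text out) := by unfold Spec_format_html_output; infer_instance

-- ===== CLAIM (what is proved, stated in full; the proofs are below) =====
def Claim_equal_format_html_output : Prop := ∀ (text : String), Dom_format_html_output text → Spec_format_html_output text (format_html_output text)

-- ===== LEMMAS AND PROOFS =====

-- fold step at the character level
def pvStepC (u : List Char) (kv : List Char × List Char) : List Char :=
  PySem.Chars.replace u kv.1 kv.2

theorem pvGo_zero (old new l acc : List Char) : PySem.Chars.replace.go old new 0 l acc = acc.reverse ++ l := by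
  rw [PySem.Chars.replace.go.eq_def]
theorem pvGo_nil (old new acc : List Char) (f : Nat) : PySem.Chars.replace.go old new f [] acc = acc.reverse := by
  rw [PySem.Chars.replace.go.eq_def]; cases f <;> simp
theorem pvGo_succ_cons (old new acc : List Char) (f : Nat) (c : Char) (t : List Char) :
    PySem.Chars.replace.go old new (f+1) (c :: t) acc =
      if old.isPrefixOf (c :: t) then PySem.Chars.replace.go old new f ((c :: t).drop old.length) (new.reverse ++ acc)
      else PySem.Chars.replace.go old new f t (c :: acc) := by
  rw [PySem.Chars.replace.go.eq_def]

theorem pvGo_eq (old new : List Char) (hold : old ≠ []) :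
    ∀ fuel l acc, l.length ≤ fuel →
      PySem.Chars.replace.go old new fuel l acc = acc.reverse ++ PySem.Chars.replace l old new := by
  have hrepl : ∀ l : List Char, PySem.Chars.replace l old new = PySem.Chars.replace.go old new l.length l [] := by
    intro l; simp [PySem.Chars.replace, hold]
  have hold1 : 1 ≤ old.length := by
    cases old with | nil => exact absurd rfl hold | cons _ _ => simp
  intro fuel
  induction fuel using Nat.strong_induction_on with
  | _ fuel ih =>
    intro l acc hl
    match fuel, l with
    | 0, l =>
      have : l = [] := by cases l <;> simp_all
      subst this
      rw [pvGo_zero, hrepl, pvGo_nil]; simp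
    | fuel + 1, [] =>
      rw [pvGo_nil, hrepl, pvGo_nil]; simp
    | fuel + 1, c :: t =>
      have hlen : t.length ≤ fuel := by simpa using hl
      have hdrop : ((c :: t).drop old.length).length ≤ fuel := by
        simp only [List.length_drop, List.length_cons]; omega
      have hdrop' : ((c :: t).drop old.length).length ≤ t.length := by
        simp only [List.length_drop, List.length_cons]; omega
      rw [pvGo_succ_cons, hrepl (c :: t)]
      rw [show (c :: t).length = t.length + 1 from by simp]
      rw [pvGo_succ_cons]
      by_cases hp : old.isPrefixOf (c :: t)
      · simp only [hp, if_true]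
        rw [ih fuel (by omega) _ _ hdrop, ih t.length (by omega) _ _ hdrop']
        simp
      · simp only [hp, Bool.false_eq_true, if_false]
        rw [ih fuel (by omega) _ _ hlen, ih t.length (by omega) _ _ (le_refl _)]
        simp

theorem pvReplace_rec (old new : List Char) (hold : old ≠ []) (l : List Char) :
    PySem.Chars.replace l old new =
      if old <+: l then new ++ PySem.Chars.replace (l.drop old.length) old new
      else match l with | [] => [] | c :: t => c :: PySem.Chars.replace t old new := by
  have hrepl : ∀ l : List Char, PySem.Chars.replace l old new = PySem.Chars.replace.go old new l.length l [] := by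
    intro l; simp [PySem.Chars.replace, hold]
  have hold1 : 1 ≤ old.length := by
    cases old with | nil => exact absurd rfl hold | cons _ _ => simp
  cases l with
  | nil =>
    rw [hrepl, pvGo_nil]
    have : ¬ old <+: ([] : List Char) := by simpa [List.prefix_nil] using hold
    simp [this]
  | cons c t =>
    rw [hrepl]
    rw [show (c :: t).length = t.length + 1 from by simp]
    rw [pvGo_succ_cons]
    by_cases hp : old <+: c :: t
    · have hp' : old.isPrefixOf (c :: t) = true := List.isPrefixOf_iff_prefix.mpr hp
      simp only [hp', if_true, hp]
      rw [pvGo_eq old new hold t.length _ _ (by simp only [List.length_drop, List.length_cons]; omega)]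
      simp
    · have hp' : old.isPrefixOf (c :: t) = false := by
        rw [Bool.eq_false_iff]; simpa [List.isPrefixOf_iff_prefix] using hp
      simp only [hp', Bool.false_eq_true, if_false, hp]
      rw [pvGo_eq old new hold t.length _ _ (le_refl _)]
      simp

theorem pvReplace_nil (old new : List Char) (hold : old ≠ []) :
    PySem.Chars.replace [] old new = [] := by
  rw [pvReplace_rec old new hold]
  have : ¬ old <+: ([] : List Char) := by simpa [List.prefix_nil] using hold
  simp [this]

theorem pvReplace_cons (old new : List Char) (hold : old ≠ []) (c : Char) (t : List Char)
    (h : ¬ old <+: c :: t) :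
    PySem.Chars.replace (c :: t) old new = c :: PySem.Chars.replace t old new := by
  rw [pvReplace_rec old new hold]; simp [h]

theorem pvReplace_pre (old new b : List Char) (hold : old ≠ []) :
    PySem.Chars.replace (old ++ b) old new = new ++ PySem.Chars.replace b old new := by
  rw [pvReplace_rec old new hold]
  simp [List.prefix_append]

theorem pvReplace_append (old new : List Char) (hold : old ≠ []) :
    ∀ a b, (∀ p, p < a.length → ¬ old <+: (a ++ b).drop p) →
      PySem.Chars.replace (a ++ b) old new = a ++ PySem.Chars.replace b old new := by
  intro a
  induction a with
  | nil => intro b _; simp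
  | cons c a' ih =>
    intro b h
    have h0 : ¬ old <+: c :: (a' ++ b) := by simpa using h 0 (by simp)
    rw [List.cons_append, pvReplace_cons old new hold _ _ h0]
    rw [ih b (fun p hp => by simpa using h (p + 1) (by simpa using Nat.succ_lt_succ hp))]
    simp

theorem pvPrefix_replace (old : List Char) (hold : old ≠ []) (nh : Char) (ntl : List Char) :
    ∀ t x : List Char, nh ∉ x → x <+: PySem.Chars.replace t old (nh :: ntl) → x <+: t := by
  intro t
  induction ht : t.length using Nat.strong_induction_on generalizing t with
  | _ n ih =>
    subst ht
    intro x hnx hpre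
    rw [pvReplace_rec old (nh :: ntl) hold] at hpre
    by_cases hp : old <+: t
    · rw [if_pos hp] at hpre
      cases x with
      | nil => exact List.nil_prefix
      | cons y x' =>
        rw [show ((nh :: ntl) ++ PySem.Chars.replace (t.drop old.length) old (nh :: ntl))
              = nh :: (ntl ++ PySem.Chars.replace (t.drop old.length) old (nh :: ntl)) from rfl] at hpre
        rw [List.cons_prefix_cons] at hpre
        exact absurd (hpre.1 ▸ List.mem_cons_self) hnx
    · rw [if_neg hp] at hpre
      cases t with
      | nil => simpa using hpre
      | cons c t' =>
        cases x with
        | nil => exact List.nil_prefix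
        | cons y x' =>
          simp only [List.cons_prefix_cons] at hpre
          obtain ⟨rfl, hpre'⟩ := hpre
          have hx' : nh ∉ x' := fun hm => hnx (List.mem_cons_of_mem _ hm)
          have := ih t'.length (by simp) t' rfl x' hx' hpre'
          exact List.cons_prefix_cons.mpr ⟨rfl, this⟩

theorem pvReplace_single (a : Char) (new : List Char) :
    ∀ s, PySem.Chars.replace s [a] new = s.flatMap (fun c => if c = a then new else [c]) := by
  intro s
  induction s with
  | nil => rw [pvReplace_nil _ _ (by simp)]; simp
  | cons c t ih =>
    by_cases hc : c = a
    · subst hc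
      have hpre : [c] <+: c :: t := by simp
      rw [pvReplace_rec _ new (by simp), if_pos hpre]
      simp [ih]
    · have hnp : ¬ [a] <+: c :: t := by
        intro h
        rw [List.cons_prefix_cons] at h
        exact hc h.1.symm
      rw [pvReplace_cons _ _ (by simp) _ _ hnp]
      simp [hc, ih]

-- ===== decidable facts about the fixed key table =====
theorem pvK_ne : ∀ kv ∈ pvKeysC, kv.1 ≠ [] ∧ kv.2 ≠ [] := by decide

set_option maxRecDepth 10000 in
theorem pvK_nopref_b :
    pvKeysC.all (fun kv => pvKeysC.all (fun kv' =>
      decide (kv.1 = kv'.1) || !(kv.1.isPrefixOf kv'.1))) = true := by decide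

-- no key is a prefix of a DIFFERENT key
theorem pvK_nopref : ∀ kv ∈ pvKeysC, ∀ kv' ∈ pvKeysC, kv.1 ≠ kv'.1 → ¬ kv.1.isPrefixOf kv'.1 := by
  intro kv hkv kv' hkv' hne hpre
  have hb := pvK_nopref_b
  rw [List.all_eq_true] at hb
  have h1 := hb kv hkv
  rw [List.all_eq_true] at h1
  have h2 := h1 kv' hkv'
  simp only [Bool.or_eq_true, decide_eq_true_eq, Bool.not_eq_true'] at h2
  rcases h2 with h2 | h2
  · exact hne h2
  · rw [h2] at hpre
    exact Bool.noConfusion hpre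

set_option maxRecDepth 10000 in
theorem pvK_inner_b :
    pvKeysC.all (fun kv => pvKeysC.all (fun kv' =>
      (List.range kv.1.length).all (fun p =>
        decide (p = 0) || !((kv'.1.take (kv.1.length - p)).isPrefixOf (kv.1.drop p))))) = true := by decide

-- no key can begin matching strictly inside another key
theorem pvK_inner : ∀ kv ∈ pvKeysC, ∀ kv' ∈ pvKeysC,
    ∀ p, p < kv.1.length → 0 < p → ¬ kv'.1.take (kv.1.length - p) <+: kv.1.drop p := by
  intro kv hkv kv' hkv' p hp hp0 hpre
  have hb := pvK_inner_b
  rw [List.all_eq_true] at hb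
  have h1 := hb kv hkv
  rw [List.all_eq_true] at h1
  have h2 := h1 kv' hkv'
  rw [List.all_eq_true] at h2
  have h3 := h2 p (List.mem_range.mpr hp)
  simp only [Bool.or_eq_true, decide_eq_true_eq, Bool.not_eq_true'] at h3
  rcases h3 with h3 | h3
  · omega
  · rw [← List.isPrefixOf_iff_prefix] at hpre
    rw [h3] at hpre
    exact Bool.noConfusion hpre

set_option maxRecDepth 10000 in
theorem pvK_head_b :
    pvKeysC.all (fun kv => pvKeysC.all (fun kv' =>
      (kv.2.take 1).all (fun nh => !(decide (nh ∈ kv'.1))))) = true := by decide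

-- the first character of a replacement occurs in no key
theorem pvK_head : ∀ kv ∈ pvKeysC, ∀ kv' ∈ pvKeysC, ∀ nh ∈ kv.2.take 1, nh ∉ kv'.1 := by
  intro kv hkv kv' hkv' nh hnh hmem
  have hb := pvK_head_b
  rw [List.all_eq_true] at hb
  have h1 := hb kv hkv
  rw [List.all_eq_true] at h1
  have h2 := h1 kv' hkv'
  rw [List.all_eq_true] at h2
  have h3 := h2 nh hnh
  simp only [Bool.not_eq_true', decide_eq_false_iff_not] at h3
  exact h3 hmem

set_option maxRecDepth 10000 in
theorem pvK_amp_b :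
    pvKeysC.all (fun kv => pvKeysC.all (fun kv' =>
      kv.2.all (fun c => !(decide (c ∈ kv'.1.take 1))))) = true := by decide

-- no character of a replacement equals the first character of any key
theorem pvK_amp : ∀ kv ∈ pvKeysC, ∀ kv' ∈ pvKeysC, ∀ c ∈ kv.2, c ∉ kv'.1.take 1 := by
  intro kv hkv kv' hkv' c hc hmem
  have hb := pvK_amp_b
  rw [List.all_eq_true] at hb
  have h1 := hb kv hkv
  rw [List.all_eq_true] at h1
  have h2 := h1 kv' hkv'
  rw [List.all_eq_true] at h2
  have h3 := h2 c hc
  simp only [Bool.not_eq_true', decide_eq_false_iff_not] at h3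
  exact h3 hmem

-- a prefix of an append restricted to the first block
theorem pvPrefix_take (x u w : List Char) (h : x <+: u ++ w) : x.take u.length <+: u := by
  have h2 : x.take u.length <+: (u ++ w).take u.length := h.take _
  simpa [List.take_left] using h2

theorem pvFoldl_nil : ∀ K' : List (List Char × List Char), (∀ kv ∈ K', kv ∈ pvKeysC) →
    K'.foldl pvStepC [] = [] := by
  intro K'
  induction K' with
  | nil => intro _; rfl
  | cons kv K'' ih =>
    intro hsub
    have h1 : kv.1 ≠ [] := (pvK_ne kv (hsub kv List.mem_cons_self)).1
    simp only [List.foldl_cons]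
    rw [show pvStepC [] kv = [] from pvReplace_nil kv.1 kv.2 h1]
    exact ih (fun x hx => hsub x (List.mem_cons_of_mem _ hx))

theorem pvFoldl_nomatch (c : Char) :
    ∀ (K' : List (List Char × List Char)) (t : List Char), (∀ kv ∈ K', kv ∈ pvKeysC) →
      (∀ kv' ∈ pvKeysC, ¬ kv'.1 <+: c :: t) →
      K'.foldl pvStepC (c :: t) = c :: K'.foldl pvStepC t ∧
      (∀ kv' ∈ pvKeysC, ¬ kv'.1 <+: c :: K'.foldl pvStepC t) := by
  intro K'
  induction K' with
  | nil => intro t _ hno; exact ⟨rfl, hno⟩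
  | cons kv K'' ih =>
    intro t hsub hno
    have hkvmem := hsub kv List.mem_cons_self
    have h1 : kv.1 ≠ [] := (pvK_ne kv hkvmem).1
    have h2 : kv.2 ≠ [] := (pvK_ne kv hkvmem).2
    obtain ⟨nh, ntl, hnh⟩ := List.exists_cons_of_ne_nil h2
    have hstep : pvStepC (c :: t) kv = c :: pvStepC t kv :=
      pvReplace_cons kv.1 kv.2 h1 c t (hno kv hkvmem)
    have hpres : ∀ kv' ∈ pvKeysC, ¬ kv'.1 <+: c :: pvStepC t kv := by
      intro kv' hkv' hpre
      obtain ⟨h', tl, hk'⟩ := List.exists_cons_of_ne_nil (pvK_ne kv' hkv').1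
      rw [hk', List.cons_prefix_cons] at hpre
      obtain ⟨rfl, htl⟩ := hpre
      have hnin : nh ∉ kv'.1 := pvK_head kv hkvmem kv' hkv' nh (by rw [hnh]; simp)
      have hnin' : nh ∉ tl := fun hm => hnin (by rw [hk']; exact List.mem_cons_of_mem _ hm)
      have htl' : tl <+: t := by
        apply pvPrefix_replace kv.1 h1 nh ntl t tl hnin'
        rw [← hnh]
        exact htl
      exact hno kv' hkv' (by rw [hk']; exact List.cons_prefix_cons.mpr ⟨rfl, htl'⟩)
    obtain ⟨ih1, ih2⟩ := ih (pvStepC t kv) (fun x hx => hsub x (List.mem_cons_of_mem _ hx)) hpres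
    refine ⟨?_, ?_⟩
    · simp only [List.foldl_cons]
      rw [hstep, ih1]
    · simp only [List.foldl_cons]
      exact ih2

theorem pvFoldl_before (k v0 : List Char) (hkv0 : (k, v0) ∈ pvKeysC) :
    ∀ (K' : List (List Char × List Char)) (b : List Char), (∀ kv ∈ K', kv ∈ pvKeysC) →
      (∀ kv ∈ K', kv.1 ≠ k) →
      K'.foldl pvStepC (k ++ b) = k ++ K'.foldl pvStepC b := by
  intro K'
  induction K' with
  | nil => intro b _ _; rfl
  | cons kv K'' ih =>
    intro b hsub hne
    have hkvmem := hsub kv List.mem_cons_self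
    have h1 : kv.1 ≠ [] := (pvK_ne kv hkvmem).1
    have hne0 : kv.1 ≠ k := hne kv List.mem_cons_self
    have happ : pvStepC (k ++ b) kv = k ++ pvStepC b kv := by
      apply pvReplace_append kv.1 kv.2 h1
      intro p hp hpre
      by_cases hp0 : p = 0
      · subst hp0
        simp only [List.drop_zero] at hpre
        rcases List.prefix_or_prefix_of_prefix hpre (List.prefix_append k b) with hc | hc
        · exact pvK_nopref kv hkvmem (k, v0) hkv0 hne0 (List.isPrefixOf_iff_prefix.mpr hc)
        · exact pvK_nopref (k, v0) hkv0 kv hkvmem (fun he => hne0 he.symm)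
            (List.isPrefixOf_iff_prefix.mpr hc)
      · rw [List.drop_append_of_le_length (le_of_lt hp)] at hpre
        have htake := pvPrefix_take kv.1 (k.drop p) b hpre
        rw [List.length_drop] at htake
        exact pvK_inner (k, v0) hkv0 kv hkvmem p hp (Nat.pos_of_ne_zero hp0) htake
    simp only [List.foldl_cons]
    rw [happ]
    exact ih (pvStepC b kv) (fun x hx => hsub x (List.mem_cons_of_mem _ hx))
      (fun x hx => hne x (List.mem_cons_of_mem _ hx))

theorem pvFoldl_after (v : List Char) (hv : ∀ kv' ∈ pvKeysC, ∀ c ∈ v, c ∉ kv'.1.take 1) :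
    ∀ (K' : List (List Char × List Char)) (y : List Char), (∀ kv ∈ K', kv ∈ pvKeysC) →
      K'.foldl pvStepC (v ++ y) = v ++ K'.foldl pvStepC y := by
  intro K'
  induction K' with
  | nil => intro y _; rfl
  | cons kv K'' ih =>
    intro y hsub
    have hkvmem := hsub kv List.mem_cons_self
    have h1 : kv.1 ≠ [] := (pvK_ne kv hkvmem).1
    have happ : pvStepC (v ++ y) kv = v ++ pvStepC y kv := by
      apply pvReplace_append kv.1 kv.2 h1
      intro p hp hpre
      rw [List.drop_append_of_le_length (le_of_lt hp), List.drop_eq_getElem_cons hp,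
        List.cons_append, ] at hpre
      obtain ⟨h', tl, hk'⟩ := List.exists_cons_of_ne_nil h1
      rw [hk', List.cons_prefix_cons] at hpre
      have hmem1 : v[p] ∈ kv.1.take 1 := by
        rw [hk', ← hpre.1]
        simp
      exact hv kv hkvmem v[p] (List.getElem_mem hp) hmem1
    simp only [List.foldl_cons]
    rw [happ]
    exact ih (pvStepC y kv) (fun x hx => hsub x (List.mem_cons_of_mem _ hx))

theorem pvScan_nil : pvScan [] = [] := by
  rw [pvScan]

theorem pvScan_cons_some (c : Char) (t : List Char) (kv : List Char × List Char)
    (h : pvFindKey (c :: t) = some kv) :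
    pvScan (c :: t) = kv.2 ++ pvScan ((c :: t).drop kv.1.length) := by
  rw [pvScan]
  split <;> simp_all

theorem pvScan_cons_none (c : Char) (t : List Char) (h : pvFindKey (c :: t) = none) :
    pvScan (c :: t) = c :: pvScan t := by
  rw [pvScan]
  split <;> simp_all

-- MAIN: the 19 sequential replaces equal the single scan, on every string
theorem pvMain : ∀ s : List Char, pvKeysC.foldl pvStepC s = pvScan s := by
  intro s
  induction hn : s.length using Nat.strong_induction_on generalizing s with
  | _ n ih =>
    subst hn
    cases s with
    | nil =>
      rw [pvFoldl_nil pvKeysC (fun _ h => h), pvScan_nil]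
    | cons c t =>
      cases hfind : pvFindKey (c :: t) with
      | none =>
        unfold pvFindKey at hfind
        have hno : ∀ kv' ∈ pvKeysC, ¬ kv'.1 <+: c :: t := by
          intro kv' hm hp
          exact List.find?_eq_none.mp hfind kv' hm (List.isPrefixOf_iff_prefix.mpr hp)
        obtain ⟨he, _⟩ := pvFoldl_nomatch c pvKeysC t (fun _ h => h) hno
        rw [he, ih t.length (by simp) t rfl, pvScan_cons_none c t hfind]
      | some kv =>
        have hfind0 := hfind
        unfold pvFindKey at hfind
        have hkvmem : kv ∈ pvKeysC := List.mem_of_find?_eq_some hfind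
        have h1 : kv.1 ≠ [] := (pvK_ne kv hkvmem).1
        obtain ⟨hpb, K1, K2, hKsplit, hmin⟩ := List.find?_eq_some_iff_append.mp hfind
        have hpre : kv.1 <+: c :: t := List.isPrefixOf_iff_prefix.mp (by simpa using hpb)
        have hsubK1 : ∀ x ∈ K1, x ∈ pvKeysC := by
          intro x hx
          rw [hKsplit]
          exact List.mem_append_left _ hx
        have hsubK2 : ∀ x ∈ K2, x ∈ pvKeysC := by
          intro x hx
          rw [hKsplit]
          exact List.mem_append_right _ (List.mem_cons_of_mem _ hx)
        have hneK1 : ∀ x ∈ K1, x.1 ≠ kv.1 := by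
          intro x hx he
          have hm := hmin x hx
          rw [Bool.not_eq_eq_eq_not, Bool.not_true] at hm
          rw [← List.isPrefixOf_iff_prefix, ← he] at hpre
          rw [hpre] at hm
          exact Bool.noConfusion hm
        set b := (c :: t).drop kv.1.length with hb
        have hcb : c :: t = kv.1 ++ b := List.prefix_append_drop hpre
        have hkv0 : (kv.1, kv.2) ∈ pvKeysC := by
          simpa using hkvmem
        have hdec : ∀ y : List Char, (K1 ++ kv :: K2).foldl pvStepC y
            = K2.foldl pvStepC (pvStepC (K1.foldl pvStepC y) kv) := by
          intro y
          rw [List.foldl_append, List.foldl_cons]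
        have hamp : ∀ kv' ∈ pvKeysC, ∀ ch ∈ kv.2, ch ∉ kv'.1.take 1 := by
          intro kv' hkv' ch hch
          exact pvK_amp kv hkvmem kv' hkv' ch hch
        calc pvKeysC.foldl pvStepC (c :: t)
            = K2.foldl pvStepC (pvStepC (K1.foldl pvStepC (kv.1 ++ b)) kv) := by
              rw [hcb, hKsplit]
              exact hdec (kv.1 ++ b)
          _ = K2.foldl pvStepC (pvStepC (kv.1 ++ K1.foldl pvStepC b) kv) := by
              rw [pvFoldl_before kv.1 kv.2 hkv0 K1 b hsubK1 hneK1]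
          _ = K2.foldl pvStepC (kv.2 ++ pvStepC (K1.foldl pvStepC b) kv) := by
              rw [show pvStepC (kv.1 ++ K1.foldl pvStepC b) kv
                    = kv.2 ++ pvStepC (K1.foldl pvStepC b) kv from
                  pvReplace_pre kv.1 kv.2 (K1.foldl pvStepC b) h1]
          _ = kv.2 ++ K2.foldl pvStepC (pvStepC (K1.foldl pvStepC b) kv) := by
              rw [pvFoldl_after kv.2 hamp K2 _ hsubK2]
          _ = kv.2 ++ (K1 ++ kv :: K2).foldl pvStepC b := by rw [hdec b]
          _ = kv.2 ++ pvKeysC.foldl pvStepC b := by rw [← hKsplit]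
          _ = kv.2 ++ pvScan b := by
              have hlt : b.length < (c :: t).length := by
                have : 0 < kv.1.length := List.length_pos_iff.mpr h1
                simp only [hb, List.length_drop, List.length_cons]
                omega
              rw [ih b.length hlt b rfl]
          _ = pvScan (c :: t) := (pvScan_cons_some c t kv hfind0).symm

-- escape phase: the two replaces equal the per-character flatMap
theorem pvEscape_eq (cs : List Char) :
    PySem.Chars.replace (PySem.Chars.replace cs "<".toList "&lt;".toList) ">".toList "&gt;".toList
      = cs.flatMap pvEscapeC := by
  have hlt : ("<".toList : List Char) = ['<'] := rfl
  have hgt : (">".toList : List Char) = ['>'] := rfl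
  rw [hlt, hgt, pvReplace_single '<' "&lt;".toList cs,
    pvReplace_single '>' "&gt;".toList, List.flatMap_assoc]
  apply List.flatMap_congr
  intro c _
  by_cases hc : c = '<'
  · subst hc; rfl
  · by_cases hc' : c = '>'
    · subst hc'; rfl
    · simp [pvEscapeC, hc, hc']

-- string-level fold = char-level fold
theorem pvFoldl_toList : ∀ (KS : List (String × String)) (s : String),
    (KS.foldl (fun t kv => PySem.Str.replace t kv.1 kv.2) s).toList
      = (KS.map (fun kv => (kv.1.toList, kv.2.toList))).foldl pvStepC s.toList := by
  intro KS
  induction KS with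
  | nil => intro s; rfl
  | cons kv KS' ih =>
    intro s
    simp only [List.foldl_cons, List.map_cons]
    rw [ih]
    congr 1
    exact PySem.Str.toList_replace s kv.1 kv.2

theorem pvAllowed_toList :
    pvAllowed.map (fun kv => (kv.1.toList, kv.2.toList)) = pvKeysC := by decide

-- ===== VERDICT (by name: the statement is the Claim_ definition above) =====
theorem format_html_output_spec : Claim_equal_format_html_output := by
  intro text _
  unfold Spec_format_html_output format_html_output format_html_output_alt
  have h1 : (pvAllowed.foldl (fun t kv => PySem.Str.replace t kv.1 kv.2)
      (PySem.Str.replace (PySem.Str.replace text "<" "&lt;") ">" "&gt;")).toList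
      = pvScan (text.toList.flatMap pvEscapeC) := by
    rw [pvFoldl_toList, pvAllowed_toList, PySem.Str.toList_replace, PySem.Str.toList_replace,
      pvEscape_eq, pvMain]
  calc pvAllowed.foldl (fun t kv => PySem.Str.replace t kv.1 kv.2)
        (PySem.Str.replace (PySem.Str.replace text "<" "&lt;") ">" "&gt;")
      = String.ofList ((pvAllowed.foldl (fun t kv => PySem.Str.replace t kv.1 kv.2)
        (PySem.Str.replace (PySem.Str.replace text "<" "&lt;") ">" "&gt;")).toList) := by
        rw [String.ofList_toList]
    _ = String.ofList (pvScan (text.toList.flatMap pvEscapeC)) := by rw [h1]
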